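-- pv_equiv track=rewrite | github.com/echohello-dev/betterfit | scripts/simctl_pick_udid.py | pick_udid
-- ===== SOURCE A (Python) =====
-- from typing import Iterable, Optional
--
-- def pick_udid(devices: list[dict], preferred_names: Iterable[str], contains: Optional[str]) -> str:
--     for name in preferred_names:
--         for device in devices:
--             if device.get("name") == name:
--                 return device.get("udid") or ""
--
--     if contains:
--         for device in devices:
--             if contains in (device.get("name") or ""):
--                 return device.get("udid") or ""
--
--     return (devices[0].get("udid") or "") if devices else ""
-- ===== SOURCE B (Python) =====
-- def pick_udid(devices, preferred_names, contains):
--     prefs = list(preferred_names)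
--     best = None  # (rank, udid): smallest rank wins, first device wins ties
--     for device in devices:
--         name = device.get("name")
--         if name in prefs:
--             rank = prefs.index(name)
--         elif contains and name is not None and contains in name:
--             rank = len(prefs)
--         else:
--             continue
--         if best is None or rank < best[0]:
--             best = (rank, device.get("udid") or "")
--     if best is not None:
--         return best[1]
--     return (devices[0].get("udid") or "") if devices else ""
-- ===== Notes on version B (the rewrite author's own statement) =====
-- stated objective: alternative
-- what changed: A's three sequential phases (preferred-name-major nested loops over devices, then a substring scan, then a first-device fallback) are replaced by a single pass over the devices that assigns each device a numeric rank (index in the preferred list, len(prefs) for a contains hit, none otherwise) and keeps the left-most device of minimal rank.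
import Mathlib
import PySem

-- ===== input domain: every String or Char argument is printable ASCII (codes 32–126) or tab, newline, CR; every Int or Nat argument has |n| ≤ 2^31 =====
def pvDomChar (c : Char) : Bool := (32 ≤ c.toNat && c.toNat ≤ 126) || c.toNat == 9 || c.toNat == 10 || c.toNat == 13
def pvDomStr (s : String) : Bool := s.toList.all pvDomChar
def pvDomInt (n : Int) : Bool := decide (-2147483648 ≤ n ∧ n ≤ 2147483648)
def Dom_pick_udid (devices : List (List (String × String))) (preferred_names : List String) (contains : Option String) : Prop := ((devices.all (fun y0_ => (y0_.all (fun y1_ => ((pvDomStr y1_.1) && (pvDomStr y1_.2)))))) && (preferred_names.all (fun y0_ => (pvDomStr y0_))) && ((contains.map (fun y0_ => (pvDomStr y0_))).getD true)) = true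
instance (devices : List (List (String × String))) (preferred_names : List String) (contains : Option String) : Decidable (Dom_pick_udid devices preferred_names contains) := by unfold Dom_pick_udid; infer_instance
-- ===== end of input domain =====

-- B replaces A's sequential scans (preferred-name-major nested loops, then a contains scan,
-- then a fallback) by ONE pass over the devices that gives each device a numeric rank and
-- keeps the left-most device of minimal rank (objective: alternative, same return value).

-- ===== PORT A =====
-- device.get("udid") or ""   (None -> ""; "" or "" is "" too, so getD "" is exact)
def aUdid (d : List (String × String)) : String :=
  ((PySem.Dict.mk d).get? "udid").getD ""

-- inner loop: for device in devices: if device.get("name") == name: return …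
def aDevLoop (n : String) : List (List (String × String)) → Option String
  | [] => none
  | d :: ds => if (PySem.Dict.mk d).get? "name" = some n then some (aUdid d) else aDevLoop n ds

-- outer loop: for name in preferred_names: …
def aPrefLoop (devices : List (List (String × String))) : List String → Option String
  | [] => none
  | n :: ns =>
    match aDevLoop n devices with
    | some u => some u
    | none => aPrefLoop devices ns

-- for device in devices: if contains in (device.get("name") or ""): return …
def aContainsLoop (c : String) : List (List (String × String)) → Option String
  | [] => none
  | d :: ds =>
    if PySem.Str.isIn c (((PySem.Dict.mk d).get? "name").getD "") then some (aUdid d)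
    else aContainsLoop c ds

def pick_udid (devices : List (List (String × String))) (preferred_names : List String) (contains : Option String) : String :=
  match aPrefLoop devices preferred_names with
  | some u => u
  | none =>
    match (match contains with
           | some c => if c ≠ "" then aContainsLoop c devices else none
           | none => none) with
    | some u => u
    | none => match devices with
              | [] => ""
              | d :: _ => aUdid d

-- ===== PORT B =====
def bUdid (d : List (String × String)) : String :=
  ((PySem.Dict.mk d).get? "udid").getD ""

-- rank of one device: index in prefs if its name is there, len(prefs) on a contains hit, none otherwise
def bRank (prefs : List String) (contains : Option String) (d : List (String × String)) : Option Nat :=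
  match (PySem.Dict.mk d).get? "name" with
  | none => none
  | some name =>
    match PySem.List.index? prefs name with
    | some i => some i
    | none =>
      match contains with
      | none => none
      | some c => if c ≠ "" ∧ PySem.Str.isIn c name then some prefs.length else none

-- the single pass: best = None; for device in devices: … if best is None or rank < best[0]: best = (rank, udid)
def bLoop (prefs : List String) (contains : Option String) :
    Option (Nat × String) → List (List (String × String)) → Option (Nat × String)
  | best, [] => best
  | best, d :: ds =>
    bLoop prefs contains
      (match bRank prefs contains d with
       | none => best
       | some r =>
         match best with
         | none => some (r, bUdid d)
         | some (br, bu) => if r < br then some (r, bUdid d) else some (br, bu)) ds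

def pick_udid_alt (devices : List (List (String × String))) (preferred_names : List String) (contains : Option String) : String :=
  match bLoop preferred_names contains none devices with
  | some (_, u) => u
  | none => match devices with
            | [] => ""
            | d :: _ => bUdid d

-- ===== PRECONDITION & SPEC =====
def Spec_pick_udid (devices : List (List (String × String))) (preferred_names : List String) (contains : Option String) (out : String) : Prop := out = pick_udid_alt devices preferred_names contains
instance (devices : List (List (String × String))) (preferred_names : List String) (contains : Option String) (out : String) : Decidable (Spec_pick_udid devices preferred_names contains out) := by unfold Spec_pick_udid; infer_instance

-- ===== CLAIM (what is proved, stated in full; the proofs are below) =====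
def Claim_equal_pick_udid : Prop := ∀ (devices : List (List (String × String))) (preferred_names : List String) (contains : Option String), Dom_pick_udid devices preferred_names contains → Spec_pick_udid devices preferred_names contains (pick_udid devices preferred_names contains)

-- ===== LEMMAS AND PROOFS =====

-- left-biased minimum of two (rank, udid) candidates
def comb : Option (Nat × String) → Option (Nat × String) → Option (Nat × String)
  | none, y => y
  | some p, none => some p
  | some (r1, u1), some (r2, u2) => if r2 < r1 then some (r2, u2) else some (r1, u1)

def nameOf (d : List (String × String)) : Option String := (PySem.Dict.mk d).get? "name"

-- the candidate a device contributes through the preferred list alone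
def prefLift (prefs : List String) (d : List (String × String)) : Option (Nat × String) :=
  match nameOf d with
  | none => none
  | some name => (PySem.List.index? prefs name).map (fun r => (r, bUdid d))

-- the candidate a device contributes through a contains hit (meaningful for c ≠ "")
def cLift (len : Nat) (c : String) (d : List (String × String)) : Option (Nat × String) :=
  if PySem.Str.isIn c ((nameOf d).getD "") then some (len, bUdid d) else none

def PB (prefs : List String) : List (List (String × String)) → Option (Nat × String)
  | [] => none
  | d :: ds => comb (prefLift prefs d) (PB prefs ds)

def CB (len : Nat) (c : String) : List (List (String × String)) → Option (Nat × String)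
  | [] => none
  | d :: ds => comb (cLift len c d) (CB len c ds)

theorem comb_none_right (x : Option (Nat × String)) : comb x none = x := by
  cases x with
  | none => rfl
  | some p => cases p; rfl

theorem comb_zero (u : String) (y : Option (Nat × String)) :
    comb (some (0, u)) y = some (0, u) := by
  cases y with
  | none => rfl
  | some p => obtain ⟨r, v⟩ := p; simp [comb]

theorem comb_assoc (a b c : Option (Nat × String)) :
    comb (comb a b) c = comb a (comb b c) := by
  cases a with
  | none => rfl
  | some p1 =>
    cases b with
    | none => rfl
    | some p2 =>
      cases c with
      | none => obtain ⟨r1, u1⟩ := p1; obtain ⟨r2, u2⟩ := p2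
                simp only [comb]; split_ifs <;> rfl
      | some p3 =>
        obtain ⟨r1, u1⟩ := p1; obtain ⟨r2, u2⟩ := p2; obtain ⟨r3, u3⟩ := p3
        simp only [comb]
        split_ifs <;> simp only [comb] <;> split_ifs <;> first | rfl | omega

theorem comb_map_succ (a b : Option (Nat × String)) :
    comb (a.map (fun p => (p.1 + 1, p.2))) (b.map (fun p => (p.1 + 1, p.2)))
      = (comb a b).map (fun p => (p.1 + 1, p.2)) := by
  cases a with
  | none => rfl
  | some p1 =>
    cases b with
    | none => rfl
    | some p2 =>
      obtain ⟨r1, u1⟩ := p1; obtain ⟨r2, u2⟩ := p2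
      simp only [Option.map_some, comb]
      split_ifs <;> first | rfl | omega

theorem bLoop_eq_comb (prefs : List String) (contains : Option String)
    (ds : List (List (String × String))) (best : Option (Nat × String)) :
    bLoop prefs contains best ds = comb best (bLoop prefs contains none ds) := by
  induction ds generalizing best with
  | nil => simp [bLoop, comb_none_right]
  | cons d ds ih =>
    have step : ∀ b, (match bRank prefs contains d with
       | none => b
       | some r =>
         match b with
         | none => some (r, bUdid d)
         | some (br, bu) => if r < br then some (r, bUdid d) else some (br, bu))
        = comb b ((bRank prefs contains d).map (fun r => (r, bUdid d))) := by
      intro b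
      cases hb : bRank prefs contains d with
      | none => simp [comb_none_right]
      | some r =>
        cases b with
        | none => rfl
        | some p => cases p; rfl
    show bLoop prefs contains _ ds = comb best (bLoop prefs contains _ ds)
    rw [step best, step none, ih, ih (comb none _), comb_assoc]
    rfl

theorem bLoop_cons (prefs : List String) (contains : Option String)
    (d : List (String × String)) (ds : List (List (String × String))) :
    bLoop prefs contains none (d :: ds)
      = comb ((bRank prefs contains d).map (fun r => (r, bUdid d))) (bLoop prefs contains none ds) := by
  show bLoop prefs contains _ ds = _
  rw [bLoop_eq_comb]
  congr 1
  cases hb : bRank prefs contains d with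
  | none => rfl
  | some r => rfl

-- B's single-pass candidate is a pref candidate when there is one, else a contains candidate
theorem bRank_map_eq (prefs : List String) (c : String) (hc : c ≠ "") (d : List (String × String)) :
    (bRank prefs (some c) d).map (fun r => (r, bUdid d))
      = (match prefLift prefs d with
         | some p => some p
         | none => cLift prefs.length c d) := by
  have h1 : PySem.Str.isIn c "" = false := by
    by_contra hx
    rw [Bool.not_eq_false, PySem.Str.isIn_iff_infix] at hx
    simp at hx
    exact hc (by cases c; simp_all)
  cases hn : (PySem.Dict.mk d).get? "name" with
  | none =>
    simp only [bRank, prefLift, cLift, nameOf, hn, Option.map_none, Option.getD_none]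
    rw [h1]
    simp
  | some name =>
    simp only [bRank, prefLift, cLift, nameOf, hn, Option.getD_some]
    cases hi : PySem.List.index? prefs name with
    | some i => simp
    | none =>
      simp only [Option.map_none]
      simp [hc]

theorem bRank_none_map_eq (prefs : List String) (d : List (String × String)) :
    (bRank prefs none d).map (fun r => (r, bUdid d)) = prefLift prefs d := by
  cases hn : (PySem.Dict.mk d).get? "name" with
  | none => simp [bRank, prefLift, nameOf, hn]
  | some name =>
    simp only [bRank, prefLift, nameOf, hn]
    cases hi : PySem.List.index? prefs name <;> simp

theorem bRank_empty_map_eq (prefs : List String) (d : List (String × String)) :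
    (bRank prefs (some "") d).map (fun r => (r, bUdid d)) = prefLift prefs d := by
  cases hn : (PySem.Dict.mk d).get? "name" with
  | none => simp [bRank, prefLift, nameOf, hn]
  | some name =>
    simp only [bRank, prefLift, nameOf, hn]
    cases hi : PySem.List.index? prefs name <;> simp

-- a pref candidate's rank is below prefs.length
theorem prefLift_lt (prefs : List String) (d : List (String × String)) (p : Nat × String)
    (h : prefLift prefs d = some p) : p.1 < prefs.length := by
  cases hn : (PySem.Dict.mk d).get? "name" with
  | none => simp [prefLift, nameOf, hn] at h
  | some name =>
    simp only [prefLift, nameOf, hn] at h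
    obtain ⟨i, hi2, hp⟩ := Option.map_eq_some_iff.mp h
    obtain ⟨hk, -⟩ := PySem.List.getElem_of_index?_eq_some hi2
    rw [← hp]
    exact hk

theorem PB_lt (prefs : List String) (ds : List (List (String × String))) (p : Nat × String)
    (h : PB prefs ds = some p) : p.1 < prefs.length := by
  induction ds generalizing p with
  | nil => exact absurd h (by simp [PB])
  | cons d ds ih =>
    simp only [PB] at h
    cases hl : prefLift prefs d with
    | none => rw [hl] at h; exact ih p h
    | some q =>
      rw [hl] at h
      cases hb : PB prefs ds with
      | none => rw [hb] at h; rw [comb_none_right] at h; cases h; exact prefLift_lt _ _ _ hl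
      | some q' =>
        rw [hb] at h
        obtain ⟨r1, u1⟩ := q; obtain ⟨r2, u2⟩ := q'
        have h1 := prefLift_lt _ _ _ hl
        have h2 := ih _ hb
        simp only [comb] at h
        split_ifs at h <;> (cases h; simp_all)

-- every CB candidate carries rank len
theorem CB_shape (len : Nat) (c : String) (ds : List (List (String × String))) :
    CB len c ds = none ∨ ∃ u, CB len c ds = some (len, u) := by
  induction ds with
  | nil => left; rfl
  | cons d ds ih =>
    simp only [CB, cLift]
    split_ifs with h
    · rcases ih with h0 | ⟨u, h0⟩ <;> rw [h0]
      · right; exact ⟨bUdid d, rfl⟩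
      · right; exact ⟨bUdid d, by simp [comb]⟩
    · simpa [comb] using ih

-- ===== A's phases, characterised through the same candidates =====

theorem PB_nil_prefs (ds : List (List (String × String))) : PB [] ds = none := by
  induction ds with
  | nil => rfl
  | cons d ds ih =>
    simp only [PB, prefLift]
    cases nameOf d <;> simp [PySem.List.index?_eq_idxOf?, ih, comb]

theorem aDevLoop_some (n : String) (ns : List String) (ds : List (List (String × String))) (u : String)
    (h : aDevLoop n ds = some u) : PB (n :: ns) ds = some (0, u) := by
  induction ds with
  | nil => exact absurd h (by simp [aDevLoop])
  | cons d ds ih =>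
    by_cases hn : (PySem.Dict.mk d).get? "name" = some n
    · have hu : some (aUdid d) = some u := by simpa [aDevLoop, hn] using h
      injection hu with hu
      simp only [PB, prefLift, nameOf, hn, PySem.List.index?_cons_self, Option.map_some]
      rw [← hu]
      exact comb_zero _ _
    · have h' : aDevLoop n ds = some u := by simpa [aDevLoop, hn] using h
      simp only [PB, ih h']
      cases hm : (PySem.Dict.mk d).get? "name" with
      | none => simp [prefLift, nameOf, hm, comb]
      | some name =>
        have hne : n ≠ name := fun hEq => hn (by rw [hm, hEq])
        simp only [prefLift, nameOf, hm, PySem.List.index?_cons_of_ne _ hne]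
        cases hi : PySem.List.index? ns name with
        | none => simp [comb]
        | some i => simp [comb]

theorem aDevLoop_none (n : String) (ns : List String) (ds : List (List (String × String)))
    (h : aDevLoop n ds = none) :
    PB (n :: ns) ds = (PB ns ds).map (fun p => (p.1 + 1, p.2)) := by
  induction ds with
  | nil => rfl
  | cons d ds ih =>
    by_cases hn : (PySem.Dict.mk d).get? "name" = some n
    · simp [aDevLoop, hn] at h
    · have h' : aDevLoop n ds = none := by simpa [aDevLoop, hn] using h
      have hlift : prefLift (n :: ns) d = (prefLift ns d).map (fun p => (p.1 + 1, p.2)) := by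
        cases hm : (PySem.Dict.mk d).get? "name" with
        | none => simp [prefLift, nameOf, hm]
        | some name =>
          have hne : n ≠ name := fun hEq => hn (by rw [hm, hEq])
          simp only [prefLift, nameOf, hm, PySem.List.index?_cons_of_ne _ hne]
          cases PySem.List.index? ns name <;> simp
      simp only [PB, hlift, ih h', comb_map_succ]

theorem aPrefLoop_eq (ds : List (List (String × String))) (prefs : List String) :
    aPrefLoop ds prefs = (PB prefs ds).map (fun p => p.2) := by
  induction prefs with
  | nil => simp [aPrefLoop, PB_nil_prefs]
  | cons n ns ih =>
    cases hd : aDevLoop n ds with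
    | some u => simp [aPrefLoop, hd, aDevLoop_some n ns ds u hd]
    | none =>
      simp only [aPrefLoop, hd, ih, aDevLoop_none n ns ds hd]
      cases PB ns ds <;> simp

theorem aContainsLoop_eq (len : Nat) (c : String) (ds : List (List (String × String))) :
    aContainsLoop c ds = (CB len c ds).map (fun p => p.2) := by
  induction ds with
  | nil => rfl
  | cons d ds ih =>
    simp only [aContainsLoop, CB, cLift, nameOf]
    split_ifs with h
    · rcases CB_shape len c ds with h0 | ⟨u, h0⟩ <;> rw [h0] <;> simp [comb, aUdid, bUdid]
    · rw [ih]; rfl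

-- ===== merging the phases: B's one pass equals A's staged scans =====

theorem bLoop_contains_eq (prefs : List String) (c : String) (hc : c ≠ "")
    (ds : List (List (String × String))) :
    bLoop prefs (some c) none ds
      = (match PB prefs ds with
         | some p => some p
         | none => CB prefs.length c ds) := by
  induction ds with
  | nil => rfl
  | cons d ds ih =>
    rw [bLoop_cons, bRank_map_eq prefs c hc d, ih]
    simp only [PB, CB]
    cases hl : prefLift prefs d with
    | some q =>
      obtain ⟨r, u⟩ := q
      have hr : r < prefs.length := prefLift_lt _ _ _ hl
      cases hb : PB prefs ds with
      | some q' => obtain ⟨r', u'⟩ := q'; simp only [comb]; split_ifs <;> rfl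
      | none =>
        rcases CB_shape prefs.length c ds with h0 | ⟨v, h0⟩ <;> rw [h0]
        · rfl
        · simp [comb, Nat.not_lt.mpr (Nat.le_of_lt hr)]
    | none =>
      cases hb : PB prefs ds with
      | some q' =>
        obtain ⟨r', u'⟩ := q'
        have hr' : r' < prefs.length := PB_lt _ _ _ hb
        simp only [cLift]
        split_ifs with h
        · simp [comb, hr']
        · rfl
      | none => rfl

theorem bLoop_pref_only (prefs : List String) (contains : Option String)
    (h : ∀ d, (bRank prefs contains d).map (fun r => (r, bUdid d)) = prefLift prefs d)
    (ds : List (List (String × String))) :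
    bLoop prefs contains none ds = PB prefs ds := by
  induction ds with
  | nil => rfl
  | cons d ds ih =>
    rw [bLoop_cons, ih, h d]
    rfl

-- ===== VERDICT (by name: the statement is the Claim_ definition above) =====
theorem pick_udid_spec : Claim_equal_pick_udid := by
  intro devices prefs contains _
  show pick_udid devices prefs contains = pick_udid_alt devices prefs contains
  unfold pick_udid pick_udid_alt
  rw [aPrefLoop_eq]
  cases contains with
  | none =>
    rw [bLoop_pref_only prefs none (fun d => bRank_none_map_eq prefs d)]
    cases PB prefs devices with
    | some p => rfl
    | none => cases devices <;> rfl
  | some c =>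
    by_cases hc : c = ""
    · subst hc
      rw [bLoop_pref_only prefs (some "") (fun d => bRank_empty_map_eq prefs d)]
      cases PB prefs devices with
      | some p => rfl
      | none => cases devices <;> rfl
    · rw [bLoop_contains_eq prefs c hc devices]
      cases PB prefs devices with
      | some p => rfl
      | none =>
        simp only [Option.map_none, if_pos hc]
        rw [aContainsLoop_eq prefs.length c devices]
        cases CB prefs.length c devices with
        | some p => rfl
        | none => cases devices <;> rfl
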